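-- pv_equiv track=rewrite | github.com/Cheznaldinio/TranslationHacks | code.py | find_most_similar_definitions
-- ===== SOURCE A (Python) =====
-- def get_line_before_colon(line):
--     # Find the index of the first colon in the line
--     colon_index = line.find(':')
--
--     # Check if the colon is present in the line
--     if colon_index != -1:
--         # Extract the substring before the colon
--         result = line[:colon_index].strip()
--         return result
--     else:
--         # If no colon is found, return the original line
--         return line.strip()
--
-- def find_most_similar_definitions(word, definitions, num_top_matches=3):
--     matches = []
--
--     for line in definitions:
--         temp_line = line
--         line = get_line_before_colon(line)
--         match_count = 0
--         temp_match_count = 0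
--         split_line = line.split()
--         for word_in_line in split_line:
--             for i in range(min(len(word), len(word_in_line))):
--                 if word[i] == word_in_line[i]:
--                     temp_match_count += 1
--                 else:
--                     break
--             if temp_match_count > match_count:
--                 match_count = temp_match_count
--             temp_match_count = 0
--
--
--         line = temp_line
--         matches.append((line.strip(), match_count))
--
--     # Sort matches by match count in descending order
--     matches.sort(key=lambda x: x[1], reverse=True)
--
--     # Filter out duplicate lines
--     unique_matches = []
--     seen_lines = set()
--
--     for line, match_count in matches:
--         if line not in seen_lines:
--             unique_matches.append((line, match_count))
--             seen_lines.add(line)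
--
--     # Return the top N unique matches
--     return [match[0] for match in unique_matches[:num_top_matches]]
-- ===== SOURCE B (Python) =====
-- def _prefix_len(a, b):
--     n = 0
--     for x, y in zip(a, b):
--         if x != y:
--             break
--         n += 1
--     return n
--
--
-- def find_most_similar_definitions(word, definitions, num_top_matches=3):
--     # Counting/bucket selection instead of any sort: scores lie in 0..len(word),
--     # so distribute stripped lines into score buckets in one pass, then emit
--     # buckets from highest score down, skipping lines already emitted.
--     buckets = [[] for _ in range(len(word) + 1)]
--     for line in definitions:
--         head = line[:line.index(':')] if ':' in line else line
--         score = max((_prefix_len(word, tok) for tok in head.split()), default=0)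
--         buckets[score].append(line.strip())
--     ordered = []
--     seen = set()
--     for bucket in reversed(buckets):
--         for key in bucket:
--             if key not in seen:
--                 seen.add(key)
--                 ordered.append(key)
--     return ordered[:num_top_matches]
-- ===== Notes on version B (the rewrite author's own statement) =====
-- stated objective: alternative
-- what changed: Replaces A's comparison sort + post-sort seen-set dedup by a sort-free counting/bucket selection: scores are bounded by len(word), so B distributes each stripped line into a score-indexed bucket in one pass and then emits buckets from highest score down, skipping already-emitted lines; no sorting happens at all.
import Mathlib
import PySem

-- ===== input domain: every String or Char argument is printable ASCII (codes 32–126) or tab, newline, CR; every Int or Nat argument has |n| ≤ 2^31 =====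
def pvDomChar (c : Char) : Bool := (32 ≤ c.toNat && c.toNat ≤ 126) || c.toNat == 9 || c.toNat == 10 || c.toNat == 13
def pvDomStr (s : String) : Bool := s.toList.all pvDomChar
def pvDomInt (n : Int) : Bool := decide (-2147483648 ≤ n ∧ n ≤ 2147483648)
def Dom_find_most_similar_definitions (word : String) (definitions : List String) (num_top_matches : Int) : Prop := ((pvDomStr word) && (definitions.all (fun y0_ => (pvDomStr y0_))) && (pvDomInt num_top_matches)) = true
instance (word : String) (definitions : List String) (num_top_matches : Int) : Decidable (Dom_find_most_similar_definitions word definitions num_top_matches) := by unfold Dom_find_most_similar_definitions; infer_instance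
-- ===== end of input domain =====

-- B replaces A's comparison sort + post-sort seen-set dedup by a sort-free counting/bucket
-- selection over the score range 0..len(word) (alternative algorithm, no speed claim).

-- ===== PORT A =====

-- helper get_line_before_colon, literal
def get_line_before_colon (line : String) : String :=
  let colon_index := PySem.Str.find line ":"
  if colon_index ≠ -1 then
    PySem.Str.strip (PySem.Str.slice line none (some colon_index))
  else
    PySem.Str.strip line

-- the inner `for i in range(min(len(word), len(word_in_line))): … else break` loop
def pvPrefA (w t : List Char) (temp : Int) (i : Nat) : Int :=
  if _h : i < min w.length t.length then
    if w.getD i default = t.getD i default then pvPrefA w t (temp + 1) (i + 1) else temp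
  else temp
termination_by min w.length t.length - i

-- per-line `match_count` computation (the token loop)
def pvScoreA (word line : String) : Int :=
  let split_line := PySem.Str.split₀ (get_line_before_colon line)
  split_line.foldl (fun match_count word_in_line =>
    let temp_match_count := pvPrefA word.toList word_in_line.toList 0 0
    if temp_match_count > match_count then temp_match_count else match_count) 0

def find_most_similar_definitions (word : String) (definitions : List String) (num_top_matches : Int) : List String :=
  let matchesL := definitions.foldl
    (fun ms line => ms ++ [(PySem.Str.strip line, pvScoreA word line)]) []
  let sortedM := PySem.List.sorted matchesL (fun x => x.2) true
  let st := sortedM.foldl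
    (fun (st : List (String × Int) × PySem.Set String) m =>
      if PySem.Set.contains st.2 m.1 then st
      else (st.1 ++ [m], PySem.Set.add st.2 m.1))
    ([], PySem.Set.empty)
  (PySem.List.slice st.1 none (some num_top_matches)).map (fun m => m.1)

-- ===== PORT B =====

-- _prefix_len's `for x, y in zip(a, b): if x != y: break; n += 1`
def pvPrefB : List (Char × Char) → Int
  | [] => 0
  | (x, y) :: rest => if x ≠ y then 0 else 1 + pvPrefB rest

-- `line[:line.index(':')] if ':' in line else line`
def pvHeadB (line : String) : String :=
  if PySem.Str.isIn ":" line then PySem.Str.slice line none (some (PySem.Str.find line ":"))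
  else line

-- `max((_prefix_len(word, tok) for tok in head.split()), default=0)`
def pvScoreB (word line : String) : Int :=
  PySem.List.maxD
    ((PySem.Str.split₀ (pvHeadB line)).map (fun tok => pvPrefB (word.toList.zip tok.toList)))
    (fun x => x) 0

-- B: counting/bucket selection.  `[[] for _ in range(len(word)+1)]` is
-- List.replicate (word.toList.length+1) []; `buckets[score].append(...)` is List.modify
-- (score is provably in range 0..len(word), where Python indexing succeeds).
def find_most_similar_definitions_alt (word : String) (definitions : List String) (num_top_matches : Int) : List String :=
  let buckets := definitions.foldl
    (fun bs line => bs.modify (pvScoreB word line).toNat (fun b => b ++ [PySem.Str.strip line]))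
    (List.replicate (word.toList.length + 1) ([] : List String))
  let st := buckets.reverse.foldl
    (fun (st : List String × PySem.Set String) bucket =>
      bucket.foldl
        (fun (st : List String × PySem.Set String) key =>
          if PySem.Set.contains st.2 key then st
          else (st.1 ++ [key], PySem.Set.add st.2 key)) st)
    ([], PySem.Set.empty)
  PySem.List.slice st.1 none (some num_top_matches)

-- ===== PRECONDITION & SPEC =====
def Spec_find_most_similar_definitions (word : String) (definitions : List String) (num_top_matches : Int) (out : List String) : Prop := out = find_most_similar_definitions_alt word definitions num_top_matches
instance (word : String) (definitions : List String) (num_top_matches : Int) (out : List String) : Decidable (Spec_find_most_similar_definitions word definitions num_top_matches out) := by unfold Spec_find_most_similar_definitions; infer_instance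

-- ===== CLAIM (what is proved, stated in full; the proofs are below) =====
def Claim_equal_find_most_similar_definitions : Prop := ∀ (word : String) (definitions : List String) (num_top_matches : Int), Dom_find_most_similar_definitions word definitions num_top_matches → Spec_find_most_similar_definitions word definitions num_top_matches (find_most_similar_definitions word definitions num_top_matches)

-- ===== LEMMAS AND PROOFS =====

-- ---- proof-side abbreviations ----

def pvMatches (word : String) (defs : List String) : List (String × Int) :=
  defs.map (fun l => (PySem.Str.strip l, pvScoreA word l))

-- composite rank on an index-decorated entry: ascending rank = (score desc, index asc)
def pvG (N : Nat) (q : (String × Int) × Nat) : Int := (q.2 : Int) - q.1.2 * N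

def pvDec (word : String) (defs : List String) : List ((String × Int) × Nat) :=
  (pvMatches word defs).zipIdx

def pvDS (word : String) (defs : List String) : List ((String × Int) × Nat) :=
  PySem.List.sorted (pvDec word defs) (pvG defs.length) false

-- the decorated matches grouped into score buckets, highest score first
def pvBD (word : String) (defs : List String) : List ((String × Int) × Nat) :=
  ((List.range (word.toList.length + 1)).reverse).flatMap
    (fun (j : Nat) => (pvDec word defs).filter (fun q => q.1.2 == (j : Int)))

-- first-occurrence dedup, on pairs keyed by the line component / on plain strings
def pvDedup (seen : List String) : List (String × Int) → List (String × Int)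
  | [] => []
  | m :: t => if m.1 ∈ seen then pvDedup seen t else m :: pvDedup (m.1 :: seen) t

def pvDedupS (seen : List String) : List String → List String
  | [] => []
  | m :: t => if m ∈ seen then pvDedupS seen t else m :: pvDedupS (m :: seen) t

-- ---- score equality ----

theorem pvPrefB_nonneg (l : List (Char × Char)) : 0 ≤ pvPrefB l := by
  induction l with
  | nil => simp [pvPrefB]
  | cons h t ih => obtain ⟨x, y⟩ := h; simp only [pvPrefB]; split <;> omega

theorem pvPrefB_le_length (l : List (Char × Char)) : pvPrefB l ≤ (l.length : Int) := by
  induction l with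
  | nil => simp [pvPrefB]
  | cons h t ih =>
    obtain ⟨x, y⟩ := h
    simp only [pvPrefB, List.length_cons]
    split
    · push_cast; omega
    · push_cast; omega

theorem pvPrefA_eq (w t : List Char) (c : Int) (i : Nat) :
    pvPrefA w t c i = c + pvPrefB ((w.drop i).zip (t.drop i)) := by
  fun_induction pvPrefA w t c i with
  | case1 c i h heq ih =>
    have hw : i < w.length := lt_of_lt_of_le h (min_le_left _ _)
    have ht : i < t.length := lt_of_lt_of_le h (min_le_right _ _)
    rw [ih, List.drop_eq_getElem_cons hw, List.drop_eq_getElem_cons ht, List.zip_cons_cons,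
      pvPrefB]
    rw [List.getD_eq_getElem w default hw, List.getD_eq_getElem t default ht] at heq
    rw [if_neg (by simpa using heq)]
    ring
  | case2 c i h heq =>
    have hw : i < w.length := lt_of_lt_of_le h (min_le_left _ _)
    have ht : i < t.length := lt_of_lt_of_le h (min_le_right _ _)
    rw [List.drop_eq_getElem_cons hw, List.drop_eq_getElem_cons ht, List.zip_cons_cons, pvPrefB]
    rw [List.getD_eq_getElem w default hw, List.getD_eq_getElem t default ht] at heq
    rw [if_pos (by simpa using heq)]
    ring
  | case3 c i h =>
    have : w.drop i = [] ∨ t.drop i = [] := by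
      rw [List.drop_eq_nil_iff, List.drop_eq_nil_iff]; omega
    rcases this with h1 | h1 <;> simp [h1, pvPrefB]

theorem pv_go_spaces (sp : List Char) (hsp : ∀ c ∈ sp, PySem.Chars.isspace c)
    (cur : List Char) (acc : List (List Char)) :
    PySem.Chars.split₀.go sp cur acc = PySem.Chars.split₀.go [] cur acc := by
  induction sp generalizing cur acc with
  | nil => rfl
  | cons c sp' ih =>
    have hc : PySem.Chars.isspace c := hsp c (List.mem_cons_self)
    have hsp' : ∀ c ∈ sp', PySem.Chars.isspace c := fun d hd => hsp d (List.mem_cons_of_mem c hd)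
    simp only [PySem.Chars.split₀.go, hc, if_true]
    split
    · rename_i hcur
      rw [ih hsp' [] acc]
      simp only [PySem.Chars.split₀.go]
      simp_all [List.isEmpty_iff]
    · rename_i hcur
      rw [ih hsp' [] (cur.reverse :: acc)]
      simp only [PySem.Chars.split₀.go]
      simp_all [List.isEmpty_iff]

theorem pv_go_append_spaces (t sp : List Char) (hsp : ∀ c ∈ sp, PySem.Chars.isspace c)
    (cur : List Char) (acc : List (List Char)) :
    PySem.Chars.split₀.go (t ++ sp) cur acc = PySem.Chars.split₀.go t cur acc := by
  induction t generalizing cur acc with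
  | nil => simpa using pv_go_spaces sp hsp cur acc
  | cons c t' ih =>
    simp only [List.cons_append, PySem.Chars.split₀.go]
    split
    · split
      · exact ih _ _
      · exact ih _ _
    · exact ih _ _

theorem pv_go_dropWhile (s : List Char) (acc : List (List Char)) :
    PySem.Chars.split₀.go (s.dropWhile PySem.Chars.isspace) [] acc = PySem.Chars.split₀.go s [] acc := by
  induction s generalizing acc with
  | nil => rfl
  | cons c s' ih =>
    by_cases hc : PySem.Chars.isspace c
    · rw [List.dropWhile_cons_of_pos (by simpa using hc)]
      rw [ih acc]
      conv_rhs => simp only [PySem.Chars.split₀.go]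
      simp [hc]
    · rw [List.dropWhile_cons_of_neg (by simpa using hc)]

theorem pv_split0_strip_chars (s : List Char) :
    PySem.Chars.split₀ (PySem.Chars.strip s) = PySem.Chars.split₀ s := by
  unfold PySem.Chars.split₀ PySem.Chars.strip
  set u := PySem.Chars.lstrip s with hu
  have hsplit : PySem.Chars.rstrip u ++ (u.reverse.takeWhile PySem.Chars.isspace).reverse = u := by
    unfold PySem.Chars.rstrip
    rw [← List.reverse_append, List.takeWhile_append_dropWhile, List.reverse_reverse]
  have hsp : ∀ c ∈ (u.reverse.takeWhile PySem.Chars.isspace).reverse, PySem.Chars.isspace c := by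
    intro c hc
    rw [List.mem_reverse] at hc
    exact List.mem_takeWhile_imp hc
  calc PySem.Chars.split₀.go (PySem.Chars.rstrip u) [] []
      = PySem.Chars.split₀.go (PySem.Chars.rstrip u ++ (u.reverse.takeWhile PySem.Chars.isspace).reverse) [] [] :=
        (pv_go_append_spaces _ _ hsp [] []).symm
    _ = PySem.Chars.split₀.go u [] [] := by rw [hsplit]
    _ = PySem.Chars.split₀.go s [] [] := by rw [hu]; exact pv_go_dropWhile s []

theorem pv_split0_strip (s : String) :
    PySem.Str.split₀ (PySem.Str.strip s) = PySem.Str.split₀ s := by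
  unfold PySem.Str.split₀
  rw [PySem.Str.toList_strip, pv_split0_strip_chars]

theorem pv_tokens_eq (line : String) :
    PySem.Str.split₀ (get_line_before_colon line) = PySem.Str.split₀ (pvHeadB line) := by
  unfold get_line_before_colon pvHeadB
  by_cases h : PySem.Str.isIn ":" line = true
  · have : PySem.Str.find line ":" ≠ -1 := by
      rw [ne_eq, PySem.Str.find_eq_neg_one_iff]
      rw [PySem.Str.isIn_iff_infix] at h
      simpa using h
    rw [if_pos this, if_pos h, pv_split0_strip]
  · have : ¬ PySem.Str.find line ":" ≠ -1 := by
      rw [ne_eq, not_not, PySem.Str.find_eq_neg_one_iff]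
      rw [PySem.Str.isIn_iff_infix] at h
      simpa using h
    rw [if_neg this, if_neg h, pv_split0_strip]

theorem pv_foldl_max (toks : List String) (f : String → Int) (hf : ∀ x, 0 ≤ f x) :
    toks.foldl (fun mc t => if f t > mc then f t else mc) 0 =
      PySem.List.maxD (toks.map f) (fun x => x) 0 := by
  have step_eq : ∀ (c : Int) (x : String), (if f x > c then f x else c) = max c (f x) := by
    intro c x
    split_ifs with h
    · exact (max_eq_right h.le).symm
    · exact (max_eq_left (by omega)).symm
  cases toks with
  | nil => simp [PySem.List.maxD, PySem.List.max?]
  | cons x t =>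
    have gen : ∀ (c : Int), t.foldl (fun mc t => if f t > mc then f t else mc) c =
        (t.map f).foldl max c := by
      intro c
      rw [List.foldl_map]
      exact PySem.List.foldl_congr_mem t _ _ c (fun acc x _ => step_eq acc x)
    rw [List.foldl_cons, step_eq, max_eq_right (hf x)]
    rw [PySem.List.maxD, List.map_cons, PySem.List.max?_id_cons, Option.getD_some, gen]

theorem pvScore_eq (word line : String) : pvScoreB word line = pvScoreA word line := by
  unfold pvScoreA pvScoreB
  rw [pv_tokens_eq]
  rw [← pv_foldl_max _ _ (fun x => pvPrefB_nonneg _)]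
  refine (PySem.List.foldl_congr_mem _ _ _ 0 ?_).symm
  intro acc x _
  simp only [pvPrefA_eq word.toList x.toList 0 0, List.drop_zero, zero_add]

-- ---- score bounds ----

theorem pv_foldl_max_bounds (S : Int) (l : List Int) (hl : ∀ v ∈ l, 0 ≤ v ∧ v ≤ S) :
    ∀ c : Int, 0 ≤ c → c ≤ S → 0 ≤ l.foldl max c ∧ l.foldl max c ≤ S := by
  induction l with
  | nil => exact fun c hc0 hcS => ⟨hc0, hcS⟩
  | cons y t ih =>
    intro c hc0 hcS
    have hy := hl y (List.mem_cons_self)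
    rw [List.foldl_cons]
    exact ih (fun v hv => hl v (List.mem_cons_of_mem y hv)) (max c y)
      (le_trans hc0 (le_max_left _ _)) (max_le hcS hy.2)

theorem pv_maxD_bounds (S : Int) (hS : 0 ≤ S) (xs : List Int)
    (h : ∀ v ∈ xs, 0 ≤ v ∧ v ≤ S) :
    0 ≤ PySem.List.maxD xs (fun x => x) 0 ∧ PySem.List.maxD xs (fun x => x) 0 ≤ S := by
  cases xs with
  | nil => simp [PySem.List.maxD, PySem.List.max?]; omega
  | cons x t =>
    rw [PySem.List.maxD, PySem.List.max?_id_cons, Option.getD_some]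
    have hx := h x (List.mem_cons_self)
    exact pv_foldl_max_bounds S t (fun v hv => h v (List.mem_cons_of_mem x hv)) x hx.1 hx.2

theorem pvScoreB_bounds (word line : String) :
    0 ≤ pvScoreB word line ∧ pvScoreB word line ≤ (word.toList.length : Int) := by
  unfold pvScoreB
  apply pv_maxD_bounds _ (by positivity)
  intro v hv
  obtain ⟨tok, -, rfl⟩ := List.mem_map.mp hv
  refine ⟨pvPrefB_nonneg _, le_trans (pvPrefB_le_length _) ?_⟩
  rw [List.length_zip]
  push_cast
  omega

-- ---- A: stability of the reverse sort via the decorated strict sort ----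

theorem pv_insertBy_deco (N : Nat) (ys : List ((String × Int) × Nat)) (x : String × Int) (i : Nat)
    (hys : ∀ q ∈ ys, q.2 < i) (hiN : i < N) :
    PySem.List.insertBy (fun a b => decide (b.2 < a.2)) x (ys.map Prod.fst) =
      (PySem.List.insertBy (fun a b => decide (pvG N a < pvG N b)) (x, i) ys).map Prod.fst := by
  induction ys with
  | nil => rfl
  | cons y ys ih =>
    have hj : y.2 < i := hys y (List.mem_cons_self)
    have hb : (y.1.2 < x.2) = (pvG N (x, i) < pvG N y) := by
      unfold pvG
      dsimp only
      apply propext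
      constructor
      · intro h
        have hm : (y.1.2 + 1) * (N : Int) ≤ x.2 * N :=
          mul_le_mul_of_nonneg_right (by omega) (by positivity)
        nlinarith
      · intro h
        by_contra hc
        rw [not_lt] at hc
        have hm : x.2 * (N : Int) ≤ y.1.2 * N :=
          mul_le_mul_of_nonneg_right (by omega) (by positivity)
        nlinarith
    simp only [List.map_cons, PySem.List.insertBy, hb]
    split
    · simp
    · simp only [List.map_cons, List.cons.injEq, true_and]
      exact ih (fun q hq => hys q (List.mem_cons_of_mem y hq))

theorem pv_foldl_deco (N : Nat) (l : List (String × Int)) (k : Nat)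
    (acc : List ((String × Int) × Nat)) (hacc : ∀ q ∈ acc, q.2 < k) (hlen : k + l.length ≤ N) :
    l.foldl (fun a x => PySem.List.insertBy (fun p q => decide (q.2 < p.2)) x a) (acc.map Prod.fst) =
      ((l.zipIdx k).foldl (fun a x => PySem.List.insertBy (fun p q => decide (pvG N p < pvG N q)) x a) acc).map Prod.fst := by
  induction l generalizing k acc with
  | nil => simp
  | cons x t ih =>
    rw [List.zipIdx_cons, List.foldl_cons, List.foldl_cons]
    have h1 := pv_insertBy_deco N acc x k hacc (by simp at hlen; omega)
    rw [h1]
    apply ih (k + 1)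
    · intro q hq
      rw [PySem.List.mem_insertBy] at hq
      rcases hq with rfl | hq
      · omega
      · exact Nat.lt_succ_of_lt (hacc q hq)
    · simp at hlen ⊢; omega

theorem pv_sorted_stable (word : String) (defs : List String) :
    PySem.List.sorted (pvMatches word defs) (fun x => x.2) true = (pvDS word defs).map Prod.fst := by
  rw [PySem.List.sorted_rev_eq_foldl_insertBy]
  unfold pvDS
  rw [PySem.List.sorted_eq_foldl_insertBy]
  have h := pv_foldl_deco defs.length (pvMatches word defs) 0 [] (by simp)
    (by simp [pvMatches])
  simpa [pvDec] using h

-- ---- facts about the decorated matches ----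

theorem pv_zipIdx_snd_lt {α : Type} (l : List α) (k : Nat) :
    (l.zipIdx k).Pairwise (fun a b => a.2 < b.2) := by
  induction l generalizing k with
  | nil => simp
  | cons x t ih =>
    rw [List.zipIdx_cons]
    refine List.Pairwise.cons ?_ (ih (k + 1))
    intro b hb
    have := List.mem_zipIdx (x := b.1) (i := b.2) (xs := t) (k := k + 1) (by simpa using hb)
    omega

theorem pv_zipIdx_fst {α : Type} (l : List α) (k : Nat) :
    (l.zipIdx k).map Prod.fst = l := by
  induction l generalizing k with
  | nil => rfl
  | cons x t ih => rw [List.zipIdx_cons, List.map_cons]; exact congrArg (x :: ·) (ih (k + 1))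

theorem pv_mem_dec_snd_lt (word : String) (defs : List String) (q : (String × Int) × Nat)
    (h : q ∈ pvDec word defs) : q.2 < defs.length := by
  obtain ⟨⟨p, i⟩, rfl⟩ : ∃ r, r = q := ⟨q, rfl⟩
  have := List.mem_zipIdx (h : (p, i) ∈ (pvMatches word defs).zipIdx 0)
  simpa [pvMatches] using this.2.1

theorem pv_dec_eq (word : String) (defs : List String) :
    pvDec word defs =
      defs.zipIdx.map (fun p => ((PySem.Str.strip p.1, pvScoreA word p.1), p.2)) := by
  unfold pvDec pvMatches
  rw [List.zipIdx_map]
  rfl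

theorem pv_mem_dec_bounds (word : String) (defs : List String) (q : (String × Int) × Nat)
    (h : q ∈ pvDec word defs) : 0 ≤ q.1.2 ∧ q.1.2 ≤ (word.toList.length : Int) := by
  rw [pv_dec_eq] at h
  obtain ⟨p, hp, rfl⟩ := List.mem_map.mp h
  simpa [← pvScore_eq] using pvScoreB_bounds word p.1

-- ---- permutation: bucket concatenation is a permutation of the original ----

theorem pv_flatMap_congr {α β : Type} (l : List α) (f g : α → List β)
    (h : ∀ a ∈ l, f a = g a) : l.flatMap f = l.flatMap g := by
  induction l with
  | nil => rfl
  | cons x t ih =>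
    rw [List.flatMap_cons, List.flatMap_cons, h x (List.mem_cons_self),
      ih (fun a ha => h a (List.mem_cons_of_mem x ha))]

theorem pv_flatMap_filter_perm {α : Type} (f : α → Int) (ss : List Int) (hnd : ss.Nodup)
    (l : List α) (hall : ∀ x ∈ l, f x ∈ ss) :
    (ss.flatMap (fun s => l.filter (fun x => f x == s))).Perm l := by
  induction ss generalizing l with
  | nil =>
    have : l = [] := List.eq_nil_iff_forall_not_mem.mpr (fun x hx => by simpa using hall x hx)
    simp [this]
  | cons s ss' ih =>
    rw [List.flatMap_cons]
    have hnotmem : s ∉ ss' := (List.nodup_cons.mp hnd).1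
    have hcong : ss'.flatMap (fun s' => l.filter (fun x => f x == s')) =
        ss'.flatMap (fun s' => (l.filter (fun x => !(f x == s))).filter (fun x => f x == s')) := by
      apply pv_flatMap_congr
      intro s' hs'
      have hne : s' ≠ s := fun hc => hnotmem (hc ▸ hs')
      rw [List.filter_filter]
      apply List.filter_congr
      intro x _
      by_cases hx : f x = s'
      · simp [hx, hne]
      · simp [hx]
    rw [hcong]
    have ih' := ih (List.nodup_cons.mp hnd).2 (l.filter (fun x => !(f x == s)))
      (fun x hx => by
        have hxl := List.mem_filter.mp hx
        have := hall x hxl.1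
        rcases List.mem_cons.mp this with hc | hc
        · exfalso; simp [hc] at hxl
        · exact hc)
    have h1 : (l.filter (fun x => f x == s) ++
        ss'.flatMap (fun s' =>
          (l.filter (fun x => !(f x == s))).filter (fun x => f x == s'))).Perm
        (l.filter (fun x => f x == s) ++ l.filter (fun x => !(f x == s))) :=
      List.Perm.append_left _ ih'
    exact h1.trans (List.filter_append_perm _ l)

-- ---- the bucket list is strictly sorted by the composite rank ----

theorem pv_bd_inner (word : String) (defs : List String) (j : Nat) :
    ((pvDec word defs).filter (fun q => q.1.2 == (j : Int))).Pairwise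
      (fun a b => pvG defs.length a < pvG defs.length b) := by
  have hsnd : (pvDec word defs).Pairwise (fun a b => a.2 < b.2) :=
    pv_zipIdx_snd_lt (pvMatches word defs) 0
  have hf : ((pvDec word defs).filter (fun q => q.1.2 == (j : Int))).Pairwise
      (fun a b => a.2 < b.2) := List.Pairwise.sublist List.filter_sublist hsnd
  refine hf.imp_of_mem ?_
  intro a b ha hb hab
  have ha' : a.1.2 = (j : Int) := by simpa using (List.mem_filter.mp ha).2
  have hb' : b.1.2 = (j : Int) := by simpa using (List.mem_filter.mp hb).2
  unfold pvG
  rw [ha', hb']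
  have : (a.2 : Int) < b.2 := by exact_mod_cast hab
  linarith

theorem pv_bd_pairwise (word : String) (defs : List String) :
    (pvBD word defs).Pairwise (fun a b => pvG defs.length a < pvG defs.length b) := by
  unfold pvBD
  rw [List.pairwise_flatMap]
  refine ⟨fun j _ => pv_bd_inner word defs j, ?_⟩
  rw [List.pairwise_reverse]
  have hr : (List.range (word.toList.length + 1)).Pairwise (· < ·) := List.pairwise_lt_range
  refine hr.imp_of_mem ?_
  intro a b _ _ hab x hx y hy
  have hxd := (List.mem_filter.mp hx).1
  have hyd := (List.mem_filter.mp hy).1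
  have hxs : x.1.2 = (b : Int) := by simpa using (List.mem_filter.mp hx).2
  have hys : y.1.2 = (a : Int) := by simpa using (List.mem_filter.mp hy).2
  unfold pvG
  rw [hxs, hys]
  have hxN : (x.2 : Int) < defs.length := by exact_mod_cast pv_mem_dec_snd_lt word defs x hxd
  have hy0 : (0 : Int) ≤ y.2 := by positivity
  have hbN : ((a : Int) + 1) * (defs.length : Int) ≤ (b : Int) * (defs.length : Int) :=
    mul_le_mul_of_nonneg_right (by exact_mod_cast hab) (by positivity)
  nlinarith

theorem pv_DS_eq_BD (word : String) (defs : List String) : pvDS word defs = pvBD word defs := by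
  unfold pvDS
  apply PySem.List.sorted_eq_of_perm_of_pairwise_lt
  · unfold pvBD
    have hrw : ((List.range (word.toList.length + 1)).reverse).flatMap
          (fun (j : Nat) => (pvDec word defs).filter (fun q => q.1.2 == (j : Int))) =
        (((List.range (word.toList.length + 1)).reverse).map (fun (j : Nat) => (j : Int))).flatMap
          (fun s => (pvDec word defs).filter (fun q => q.1.2 == s)) := by
      rw [List.flatMap_map]
    rw [hrw]
    apply pv_flatMap_filter_perm
    · refine List.Nodup.map (fun a b h => by exact_mod_cast h) ?_
      exact List.nodup_reverse.mpr List.nodup_range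
    · intro q hq
      obtain ⟨h0, hS⟩ := pv_mem_dec_bounds word defs q hq
      rw [List.mem_map]
      refine ⟨q.1.2.toNat, ?_, Int.toNat_of_nonneg h0⟩
      rw [List.mem_reverse, List.mem_range]
      omega
  · exact pv_bd_pairwise word defs

-- ---- B: the bucket fold ----

theorem pv_bucket_get (word : String) (l : List String) (bs : List (List String)) (j : Nat) :
    (l.foldl (fun bs line => bs.modify (pvScoreB word line).toNat
        (fun b => b ++ [PySem.Str.strip line])) bs)[j]? =
      (bs[j]?).map (fun b => b ++
        (l.filter (fun line => (pvScoreB word line).toNat == j)).map PySem.Str.strip) := by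
  induction l generalizing bs with
  | nil => simp
  | cons x t ih =>
    rw [List.foldl_cons, ih, List.getElem?_modify]
    by_cases h : (pvScoreB word x).toNat = j
    · rw [List.filter_cons_of_pos (by simpa using h)]
      simp only [h, Option.map_eq_map, Option.map_map]
      congr 1
      funext b
      simp
    · rw [List.filter_cons_of_neg (by simpa using h)]
      simp [h]

theorem pv_buckets_eq (word : String) (defs : List String) :
    defs.foldl (fun bs line => bs.modify (pvScoreB word line).toNat
        (fun b => b ++ [PySem.Str.strip line]))
      (List.replicate (word.toList.length + 1) ([] : List String)) =
    (List.range (word.toList.length + 1)).map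
      (fun j => (defs.filter (fun line => (pvScoreB word line).toNat == j)).map PySem.Str.strip) := by
  apply List.ext_getElem?
  intro i
  rw [pv_bucket_get]
  by_cases h : i < word.toList.length + 1
  · have h1 : (List.replicate (word.toList.length + 1) ([] : List String))[i]? = some [] := by
      rw [List.getElem?_replicate, if_pos h]
    have h2 : (List.range (word.toList.length + 1))[i]? = some i := by
      rw [List.getElem?_eq_getElem (by simpa using h)]
      simp
    rw [h1, List.getElem?_map, h2]
    simp
  · have h1 : (List.replicate (word.toList.length + 1) ([] : List String))[i]? = none := by
      rw [List.getElem?_eq_none_iff, List.length_replicate]; omega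
    have h2 : (List.range (word.toList.length + 1))[i]? = none := by
      rw [List.getElem?_eq_none_iff, List.length_range]; omega
    rw [h1, List.getElem?_map, h2]
    rfl

-- ---- dedup lemmas ----

theorem pv_dedup_foldl (l : List (String × Int)) (acc : List (String × Int))
    (s : PySem.Set String) (seen : List String) (hmem : ∀ x : String, x ∈ s ↔ x ∈ seen) :
    (l.foldl (fun (st : List (String × Int) × PySem.Set String) m =>
        if PySem.Set.contains st.2 m.1 then st
        else (st.1 ++ [m], PySem.Set.add st.2 m.1)) (acc, s)).1 = acc ++ pvDedup seen l := by
  induction l generalizing acc s seen with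
  | nil => simp [pvDedup]
  | cons m t ih =>
    simp only [List.foldl_cons, pvDedup]
    by_cases h : m.1 ∈ seen
    · rw [if_pos (by rw [PySem.Set.contains_iff]; exact (hmem m.1).mpr h), if_pos h]
      exact ih acc s seen hmem
    · rw [if_neg (by rw [PySem.Set.contains_iff, hmem]; exact h), if_neg h]
      rw [ih (acc ++ [m]) (PySem.Set.add s m.1) (m.1 :: seen)
        (fun x => by rw [PySem.Set.mem_add]; simp [hmem x, or_comm])]
      simp

theorem pv_dedupS_foldl (l : List String) (acc : List String)
    (s : PySem.Set String) (seen : List String) (hmem : ∀ x : String, x ∈ s ↔ x ∈ seen) :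
    (l.foldl (fun (st : List String × PySem.Set String) key =>
        if PySem.Set.contains st.2 key then st
        else (st.1 ++ [key], PySem.Set.add st.2 key)) (acc, s)).1 = acc ++ pvDedupS seen l := by
  induction l generalizing acc s seen with
  | nil => simp [pvDedupS]
  | cons m t ih =>
    simp only [List.foldl_cons, pvDedupS]
    by_cases h : m ∈ seen
    · rw [if_pos (by rw [PySem.Set.contains_iff]; exact (hmem m).mpr h), if_pos h]
      exact ih acc s seen hmem
    · rw [if_neg (by rw [PySem.Set.contains_iff, hmem]; exact h), if_neg h]
      rw [ih (acc ++ [m]) (PySem.Set.add s m) (m :: seen)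
        (fun x => by rw [PySem.Set.mem_add]; simp [hmem x, or_comm])]
      simp

theorem pv_dedupS_map (seen : List String) (l : List (String × Int)) :
    pvDedupS seen (l.map Prod.fst) = (pvDedup seen l).map Prod.fst := by
  induction l generalizing seen with
  | nil => simp [pvDedupS, pvDedup]
  | cons m t ih =>
    simp only [List.map_cons, pvDedupS, pvDedup]
    by_cases h : m.1 ∈ seen
    · simp [h, ih]
    · simp [h, ih]

-- ---- linking the bucket stream to the decorated bucket list ----

theorem pv_stream_eq (word : String) (defs : List String) :
    ((List.range (word.toList.length + 1)).map
        (fun j => (defs.filter (fun line => (pvScoreB word line).toNat == j)).map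
          PySem.Str.strip)).reverse.flatten =
      (pvBD word defs).map (fun q => q.1.1) := by
  rw [← List.map_reverse, ← List.flatMap_def]
  unfold pvBD
  rw [List.map_flatMap]
  apply pv_flatMap_congr
  intro j _
  rw [pv_dec_eq, List.filter_map, List.map_map]
  conv_lhs => rw [← pv_zipIdx_fst defs 0, List.filter_map, List.map_map]
  have hpred : ∀ p ∈ defs.zipIdx,
      ((fun line => (pvScoreB word line).toNat == j) ∘ Prod.fst) p =
        ((fun q => q.1.2 == (j : Int)) ∘
          (fun p => ((PySem.Str.strip p.1, pvScoreA word p.1), p.2))) p := by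
    intro p _
    simp only [Function.comp]
    obtain ⟨h0, -⟩ := pvScoreB_bounds word p.1
    rw [← pvScore_eq, Bool.eq_iff_iff]
    simp only [beq_iff_eq]
    omega
  rw [List.filter_congr hpred]
  rfl

theorem pv_map_slice {α β : Type} (f : α → β) (xs : List α) (b : Int) :
    (PySem.List.slice xs none (some b)).map f = PySem.List.slice (xs.map f) none (some b) := by
  simp [PySem.List.slice, List.map_take]

-- ===== VERDICT (by name: the statement is the Claim_ definition above) =====
theorem find_most_similar_definitions_spec : Claim_equal_find_most_similar_definitions := by
  unfold Claim_equal_find_most_similar_definitions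
  intro word definitions num_top_matches _
  unfold Spec_find_most_similar_definitions
  simp only [find_most_similar_definitions, find_most_similar_definitions_alt]
  -- A side
  rw [PySem.List.foldl_append_singleton_eq_map (fun line => (PySem.Str.strip line, pvScoreA word line)) definitions []]
  rw [List.nil_append]
  have hm : definitions.map (fun line => (PySem.Str.strip line, pvScoreA word line)) =
      pvMatches word definitions := rfl
  rw [hm, pv_sorted_stable]
  rw [pv_dedup_foldl _ [] PySem.Set.empty [] (by simp [PySem.Set.empty])]
  rw [List.nil_append, pv_map_slice, ← pv_dedupS_map, List.map_map]
  -- B side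
  rw [pv_buckets_eq, ← List.foldl_flatten]
  rw [pv_dedupS_foldl _ [] PySem.Set.empty [] (by simp [PySem.Set.empty])]
  rw [List.nil_append, pv_stream_eq, ← pv_DS_eq_BD]
  rfl
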